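-- pv_equiv track=rewrite | github.com/zhengmingli/-NLP | nlpcc3.6/test.py | getDaiciIndex
-- ===== SOURCE A (Python) =====
-- def getDaiciIndex(result):
--     cixinglist=result['tag'];
--     #找最远代词
--     if 'r' in cixinglist:
--         index=cixinglist.index('r');
--         real_index=index;
--         if(index!=-1):
--             index=index+1;
--             while(index<len(cixinglist)):
--                 if(cixinglist[index]=='r'):
--                     real_index=index;
--                 index=index+1;
--         return real_index;
--     elif 'd' in cixinglist:
--         return cixinglist.index('d');
--     else:
--         return len(cixinglist)-2;
-- ===== SOURCE B (Python) =====
-- def getDaiciIndex(result):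
--     tags = result['tag']
--     last_r = None
--     first_d = None
--     for i, t in enumerate(tags):
--         if t == 'r':
--             last_r = i
--         elif t == 'd' and first_d is None:
--             first_d = i
--     if last_r is not None:
--         return last_r
--     if first_d is not None:
--         return first_d
--     return len(tags) - 2
-- ===== Notes on version B (the rewrite author's own statement) =====
-- stated objective: simpler
-- what changed: Replaced the membership tests, the two .index scans and the forward while-loop with one enumerate pass maintaining the last 'r' index and the first 'd' index, followed by a three-way decision.
import Mathlib
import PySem

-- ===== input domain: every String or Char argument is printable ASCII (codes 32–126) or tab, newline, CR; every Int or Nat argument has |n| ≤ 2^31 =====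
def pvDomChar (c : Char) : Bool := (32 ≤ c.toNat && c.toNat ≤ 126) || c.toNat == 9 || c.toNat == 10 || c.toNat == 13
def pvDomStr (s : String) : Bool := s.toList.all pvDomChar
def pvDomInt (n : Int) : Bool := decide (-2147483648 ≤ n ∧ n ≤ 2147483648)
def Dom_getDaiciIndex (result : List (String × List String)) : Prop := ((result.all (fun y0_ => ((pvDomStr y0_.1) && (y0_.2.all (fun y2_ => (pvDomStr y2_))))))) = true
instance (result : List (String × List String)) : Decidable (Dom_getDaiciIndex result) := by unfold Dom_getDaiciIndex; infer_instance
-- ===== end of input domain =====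

-- One-pass re-implementation: a single enumerate loop keeps the last 'r' index and the
-- first 'd' index, replacing A's membership tests, .index scans and forward while-loop (objective: simpler).


-- ===== PORT A =====
def getDaiciIndex (result : List (String × List String)) : Int :=
  let cixinglist := ((PySem.Dict.mk result).get? "tag").getD []
  if "r" ∈ cixinglist then
    let index : Int := (((PySem.List.index? cixinglist "r").getD 0 : Nat) : Int)
    let realIndex : Int := index
    if index ≠ -1 then
      (PySem.List.pyRange (index + 1) (cixinglist.length : Int) 1).foldl
        (fun ri j => if PySem.List.pyGetD cixinglist j "" = "r" then j else ri) realIndex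
    else realIndex
  else if "d" ∈ cixinglist then
    (((PySem.List.index? cixinglist "d").getD 0 : Nat) : Int)
  else (cixinglist.length : Int) - 2

-- ===== PORT B =====
-- loop body of B's single enumerate pass: update (last_r, first_d) with one (index, tag) pair
def bStep (st : Option Int × Option Int) (p : Int × String) : Option Int × Option Int :=
  if p.2 = "r" then (some p.1, st.2)
  else if p.2 = "d" ∧ st.2 = none then (st.1, some p.1)
  else st

def getDaiciIndex_alt (result : List (String × List String)) : Int :=
  let tags := ((PySem.Dict.mk result).get? "tag").getD []
  let st := (PySem.List.enumerate tags 0).foldl bStep (none, none)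
  match st.1 with
  | some i => i
  | none =>
    match st.2 with
    | some j => j
    | none => (tags.length : Int) - 2

-- ===== PRECONDITION & SPEC =====
-- Pre_ excludes exactly the inputs without a "tag" key, on which Python A raises KeyError.
def Pre_getDaiciIndex (result : List (String × List String)) : Prop :=
  ((PySem.Dict.mk result).get? "tag").isSome = true
instance (result : List (String × List String)) : Decidable (Pre_getDaiciIndex result) := by unfold Pre_getDaiciIndex; infer_instance

def pvWitness_getDaiciIndex : (List (String × List String)) := [("tag", ["x", "r", "d"])]

def Spec_getDaiciIndex (result : List (String × List String)) (out : Int) : Prop := out = getDaiciIndex_alt result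
instance (result : List (String × List String)) (out : Int) : Decidable (Spec_getDaiciIndex result out) := by unfold Spec_getDaiciIndex; infer_instance

-- ===== CLAIM (what is proved, stated in full; the proofs are below) =====
def Claim_equal_getDaiciIndex : Prop := ∀ (result : List (String × List String)), Dom_getDaiciIndex result → Pre_getDaiciIndex result → Spec_getDaiciIndex result (getDaiciIndex result)

-- ===== LEMMAS AND PROOFS =====

-- index (0-based) of the LAST occurrence of "r", by structural recursion from the front
def lastIdx? : List String → Option Nat
  | [] => none
  | x :: xs =>
    match lastIdx? xs with
    | some j => some (j + 1)
    | none => if x = "r" then some 0 else none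

theorem lastIdx?_eq_none_iff (xs : List String) : lastIdx? xs = none ↔ "r" ∉ xs := by
  induction xs with
  | nil => simp [lastIdx?]
  | cons x xs ih =>
    cases h : lastIdx? xs with
    | some j =>
      have hm : "r" ∈ xs := by
        by_contra hn
        rw [ih.2 hn] at h
        simp at h
      simp [lastIdx?, h, hm]
    | none =>
      have hm : "r" ∉ xs := ih.1 h
      by_cases hx : x = "r"
      · simp [lastIdx?, h, hx]
      · simp [lastIdx?, h, hx, hm, Ne.symm hx]

theorem lastIdx?_append (xs ys : List String) :
    lastIdx? (xs ++ ys) =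
      match lastIdx? ys with
      | some j => some (xs.length + j)
      | none => lastIdx? xs := by
  induction xs with
  | nil => cases h : lastIdx? ys <;> simp [lastIdx?, h]
  | cons x xs ih =>
    simp only [List.cons_append, lastIdx?, ih]
    cases h : lastIdx? ys with
    | some j => simp only [List.length_cons]; congr 1; omega
    | none => rfl

theorem bStep_r (st : Option Int × Option Int) (s : Int) :
    bStep st (s, "r") = (some s, st.2) := by simp [bStep]

theorem bStep_d_none (a : Option Int) (s : Int) :
    bStep (a, none) (s, "d") = (a, some s) := by simp [bStep]

theorem bStep_d_some (a : Option Int) (v : Int) (s : Int) :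
    bStep (a, some v) (s, "d") = (a, some v) := by simp [bStep]

theorem bStep_other (st : Option Int × Option Int) (s : Int) (x : String)
    (hr : x ≠ "r") (hd : x ≠ "d") : bStep st (s, x) = st := by
  simp [bStep, hr, hd]

-- B's single-pass fold, characterised
theorem alt_fold (tags : List String) (s : Int) (a b : Option Int) :
    (PySem.List.enumerate tags s).foldl bStep (a, b) =
    ((match lastIdx? tags with
      | some j => some (s + (j : Int))
      | none => a),
     (match b with
      | some _ => b
      | none => Option.map (fun j : Nat => s + (j : Int)) (PySem.List.index? tags "d"))) := by
  induction tags generalizing s a b with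
  | nil => cases b <;> simp [lastIdx?, PySem.List.enumerate_nil, PySem.List.index?]
  | cons x xs ih =>
    rw [PySem.List.enumerate_cons, List.foldl_cons]
    by_cases hr : x = "r"
    · subst hr
      rw [bStep_r, ih]
      rw [PySem.List.index?_cons_of_ne xs (by decide : ("r":String) ≠ "d")]
      refine Prod.ext ?_ ?_
      · cases h : lastIdx? xs with
        | some j => simp [lastIdx?, h]; ring
        | none => simp [lastIdx?, h]
      · cases b with
        | some v => rfl
        | none =>
          cases h : PySem.List.index? xs "d" with
          | some j => simp; ring
          | none => simp
    · by_cases hdd : x = "d"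
      · subst hdd
        cases b with
        | none =>
          rw [bStep_d_none, ih]
          rw [PySem.List.index?_cons_self]
          refine Prod.ext ?_ ?_
          · cases h : lastIdx? xs with
            | some j => simp [lastIdx?, h]; ring
            | none => simp [lastIdx?, h, hr]
          · simp
        | some v =>
          rw [bStep_d_some, ih]
          refine Prod.ext ?_ ?_
          · cases h : lastIdx? xs with
            | some j => simp [lastIdx?, h]; ring
            | none => simp [lastIdx?, h, hr]
          · rfl
      · rw [bStep_other _ _ _ hr hdd, ih]
        rw [PySem.List.index?_cons_of_ne xs hdd]
        refine Prod.ext ?_ ?_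
        · cases h : lastIdx? xs with
          | some j => simp [lastIdx?, h]; ring
          | none => simp [lastIdx?, h, hr]
        · cases b with
          | some v => rfl
          | none =>
            cases h : PySem.List.index? xs "d" with
            | some j => simp; ring
            | none => simp

-- A's index-based while loop equals a fold over the enumerated suffix
theorem range_fold_eq_enum (tags : List String) (a : Nat) (init : Int) :
    (PySem.List.pyRange (a : Int) (tags.length : Int) 1).foldl
      (fun ri j => if PySem.List.pyGetD tags j "" = "r" then j else ri) init =
    (PySem.List.enumerate (tags.drop a) (a : Int)).foldl
      (fun ri p => if p.2 = "r" then p.1 else ri) init := by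
  induction hn : tags.length - a generalizing a init with
  | zero =>
    have hle : tags.length ≤ a := by omega
    rw [PySem.List.pyRange_one_eq_nil (by exact_mod_cast hle),
        List.drop_eq_nil_of_le hle, PySem.List.enumerate_nil]
    rfl
  | succ n ih =>
    have hlt : a < tags.length := by omega
    rw [PySem.List.pyRange_one_cons (by exact_mod_cast hlt), List.foldl_cons]
    rw [List.drop_eq_getElem_cons hlt, PySem.List.enumerate_cons, List.foldl_cons]
    have hget : PySem.List.pyGetD tags (a : Int) "" = tags[a] := by
      rw [PySem.List.pyGetD_natCast]
      simp [hlt]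
    rw [hget]
    have hc : ((a : Int) + 1) = ((a + 1 : Nat) : Int) := by push_cast; ring
    rw [hc, ih (a + 1) _ (by omega)]

-- the simpler enumerate fold computes the last "r" index
theorem enum_fold_last (tags : List String) (s init : Int) :
    (PySem.List.enumerate tags s).foldl
      (fun ri p => if p.2 = "r" then p.1 else ri) init =
    (match lastIdx? tags with
     | some j => s + (j : Int)
     | none => init) := by
  induction tags generalizing s init with
  | nil => simp [lastIdx?, PySem.List.enumerate_nil]
  | cons x xs ih =>
    rw [PySem.List.enumerate_cons, List.foldl_cons, ih]
    by_cases hr : x = "r"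
    · subst hr
      cases h : lastIdx? xs with
      | some j => simp [lastIdx?, h]; ring
      | none => simp [lastIdx?, h]
    · cases h : lastIdx? xs with
      | some j => simp [lastIdx?, h]; ring
      | none => simp [lastIdx?, h, hr]

-- lastIdx? from the first-occurrence index and the last occurrence in the rest
theorem lastIdx?_of_index? (tags : List String) (k : Nat)
    (h : PySem.List.index? tags "r" = some k) :
    lastIdx? tags = some (match lastIdx? (tags.drop (k + 1)) with
                          | some j => k + 1 + j
                          | none => k) := by
  obtain ⟨pre, suf, hsplit, hlen, -⟩ := (PySem.List.index?_eq_some_iff _ _ _).1 h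
  subst hsplit
  have hdrop : (pre ++ "r" :: suf).drop (k + 1) = suf := by
    rw [← hlen]
    simp [List.drop_append]
  rw [hdrop, lastIdx?_append]
  cases hs : lastIdx? suf with
  | some j => simp [lastIdx?, hs, hlen]; ring
  | none => simp [lastIdx?, hs, hlen]

-- the core equality, for an arbitrary tag list
theorem core (tags : List String) :
    (if "r" ∈ tags then
       (if (((PySem.List.index? tags "r").getD 0 : Nat) : Int) ≠ -1 then
         (PySem.List.pyRange ((((PySem.List.index? tags "r").getD 0 : Nat) : Int) + 1) (tags.length : Int) 1).foldl
           (fun ri j => if PySem.List.pyGetD tags j "" = "r" then j else ri)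
           (((PySem.List.index? tags "r").getD 0 : Nat) : Int)
        else (((PySem.List.index? tags "r").getD 0 : Nat) : Int))
     else if "d" ∈ tags then (((PySem.List.index? tags "d").getD 0 : Nat) : Int)
     else (tags.length : Int) - 2) =
    (match ((PySem.List.enumerate tags 0).foldl bStep (none, none)).1 with
     | some i => i
     | none =>
       match ((PySem.List.enumerate tags 0).foldl bStep (none, none)).2 with
       | some j => j
       | none => (tags.length : Int) - 2) := by
  rw [alt_fold]
  by_cases hr : "r" ∈ tags
  · obtain ⟨k, hk⟩ := Option.isSome_iff_exists.1 ((PySem.List.index?_isSome_iff _ _).2 hr)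
    rw [if_pos hr, hk]
    have hne : (((some k).getD 0 : Nat) : Int) ≠ -1 := by simp
    rw [if_pos hne]
    have hcast : ((((some k).getD 0 : Nat) : Int) + 1) = ((k + 1 : Nat) : Int) := by
      simp
    rw [hcast, range_fold_eq_enum tags (k + 1), enum_fold_last,
        lastIdx?_of_index? tags k hk]
    cases hs : lastIdx? (tags.drop (k + 1)) with
    | some j => simp
    | none => simp
  · have hnone : lastIdx? tags = none := (lastIdx?_eq_none_iff tags).2 hr
    rw [if_neg hr, hnone]
    by_cases hd : "d" ∈ tags
    · obtain ⟨j, hj⟩ := Option.isSome_iff_exists.1 ((PySem.List.index?_isSome_iff _ _).2 hd)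
      rw [if_pos hd, hj]
      simp
    · have hjn : PySem.List.index? tags "d" = none := (PySem.List.index?_eq_none_iff _ _).2 hd
      rw [if_neg hd, hjn]
      simp

-- ===== VERDICT (by name: the statement is the Claim_ definition above) =====
theorem getDaiciIndex_spec : Claim_equal_getDaiciIndex := by
  intro result _ _
  show getDaiciIndex result = getDaiciIndex_alt result
  unfold getDaiciIndex getDaiciIndex_alt
  exact core (((PySem.Dict.mk result).get? "tag").getD [])
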